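/- GENERATED by tools/from_farm_form.py from prooffarm-gif/accepted/DGifGetScreenDesc.5/Proof.lean (a worked proof of the farm's unit `DGifGetScreenDesc.5`,
   accepted by the verdict) — do not edit. -/
import Gif.Spec.Units.DGifGetScreenDesc_5
import Gif.Spec.AllSegs
import Gif.Spec.Proved.DGifGetScreenDesc_5_Lemmas

open X86 X86.User Asan ProgX.Base ProgX.Base.Spec Gif.Spec

/-!
  `DGifGetScreenDesc.5` (0x108253 … 0x108284 and 0x10832a … 0x108375, 27 instructions; dgif_lib.c:288-294, 309): THE HEAD OF THE COLOUR
  LOOP of a protected function, with two calls in the middle. Their return addresses 0x10827b (`ret19`, behind InternalRead) and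
  0x10833f (`ret29`, behind GifFreeMapObject) are not cuts of the design, so the unit makes them cuts of its own: the private
  assertions `gsd5_AtRet19` and `gsd5_AtRet29` and three walks (Lemmas.lean), chained here:

      gsd5_seg_read    0x108253 … the call of InternalRead … 0x10827b, or `ColorCount ≤ i`: 0x10836a … 0x1080f7 (GIF_OK)
      gsd5_seg_free    0x10827b … 0x108284 (three bytes: into the loop's body), or 0x10832a … the call of GifFreeMapObject … 0x10833f
      gsd5_seg_null    0x10833f … `SColorMap = NULL`, `Error`, `r12d = 0` … 0x1080f7 (GIF_ERROR)
-/

/-- Segment 5 of `DGifGetScreenDesc` takes `Head` at 0x108253 to `InLoop` at 0x108284 or to `Done` at 0x1080f7. -/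
theorem Gif.Spec.Proved.DGifGetScreenDesc_5_ok : Gif.Spec.DGifGetScreenDesc_5.Statement := by
  intro Lay hLay μ hμ u₀ hcode h_InternalRead h_GifFreeMapObject h_load4 h_load8 h_store8 h_store4
  intro H rest frames F R Hc mp m e ret v hat
  -- the callees' contracts for the frame list of the body (the own frame in front), the present heap and the forest with the map
  have hir := h_InternalRead Hc rest (DGifGetScreenDesc.framesIn frames e) (DGifGetScreenDesc.withMap F mp) R 3
  have hfm := h_GifFreeMapObject Hc rest (DGifGetScreenDesc.framesIn frames e) mp.colors (3 * mp.count)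
  -- 0x108253 … the call of InternalRead … 0x10827b (ret19), or the exit with GIF_OK
  refine (Gif.Spec.DGifGetScreenDesc_5.gsd5_seg_read Lay hLay μ hμ u₀ hcode H rest frames F R Hc mp m e ret hir h_load4
    v hat).trans ?_
  intro v1 hv1
  rcases hv1 with hret19 | hexit
  · -- 0x10827b … 0x108284 (InLoop), or … the call of GifFreeMapObject … 0x10833f (ret29)
    refine (Gif.Spec.DGifGetScreenDesc_5.gsd5_seg_free Lay hLay μ hμ u₀ hcode H rest frames F R Hc mp m e ret hfm h_load8
      v1 hret19).trans ?_
    intro v2 hv2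
    rcases hv2 with hloop | hret29
    · exact ReachVia.done (Or.inl hloop)
    · -- 0x10833f … 0x1080f7: the exit with GIF_ERROR
      refine ReachVia.mono ?_ (fun w hw => Or.inr hw)
      exact Gif.Spec.DGifGetScreenDesc_5.gsd5_seg_null Lay hLay μ hμ u₀ hcode H rest frames F R Hc mp e ret h_store8 h_store4
        v2 hret29
  · exact ReachVia.done (Or.inr hexit)
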